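-- pv_equiv track=rewrite | github.com/iglabari/ClaraFold | ClaraFold.py | extract_pseudoknot_groups
-- ===== SOURCE A (Python) =====
-- def extract_pseudoknot_groups(structure):
--     """
--     Extrae grupos consecutivos de pseudonudos de una estructura.
--
--     Args:
--         structure (str): Estructura de RNA
--
--     Returns:
--         list: Lista de tuplas (inicio, fin, contenido) de cada grupo
--     """
--     groups = []
--     in_group = False
--     start = 0
--     group_content = ""
--
--     for i, char in enumerate(structure):
--         if char in '<>' and not in_group:
--             in_group = True
--             start = i
--             group_content = char
--         elif char in '<>' and in_group:
--             group_content += char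
--         elif char not in '<>' and in_group:
--             if len(group_content) > 0:  # Solo guardar si hay contenido real
--                 groups.append((start, i-1, group_content))
--             in_group = False
--             group_content = ""
--
--     # Añadir el último grupo si estamos dentro de uno
--     if in_group and len(group_content) > 0:
--         groups.append((start, len(structure)-1, group_content))
--
--     return groups
-- ===== SOURCE B (Python) =====
-- import re
--
-- def extract_pseudoknot_groups(structure):
--     return [(m.start(), m.end() - 1, m.group())
--             for m in re.finditer(r'[<>]+', structure)]
-- ===== Notes on version B (the rewrite author's own statement) =====
-- stated objective: idiomatic
-- what changed: Replaces the char-by-char in_group state machine with re.finditer over maximal runs of pseudoknot bracket characters; the run scan happens inside the C regex engine instead of the Python loop.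
import Mathlib
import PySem

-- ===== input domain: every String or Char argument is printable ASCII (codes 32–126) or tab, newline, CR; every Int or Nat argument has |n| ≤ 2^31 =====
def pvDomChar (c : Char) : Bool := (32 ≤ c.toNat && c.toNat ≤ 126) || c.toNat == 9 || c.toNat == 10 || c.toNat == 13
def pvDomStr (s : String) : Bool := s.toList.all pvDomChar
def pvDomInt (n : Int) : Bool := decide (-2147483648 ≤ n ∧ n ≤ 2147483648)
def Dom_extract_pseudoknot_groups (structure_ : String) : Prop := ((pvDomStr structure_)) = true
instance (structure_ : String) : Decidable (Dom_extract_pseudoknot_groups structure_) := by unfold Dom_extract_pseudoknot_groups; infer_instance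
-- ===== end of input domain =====

-- B replaces A's char-by-char in_group state machine with a re.finditer scan over
-- maximal runs of pseudoknot bracket characters; objective: idiomatic.

-- ===== PORT A =====
-- the membership test `char in` the bracket pair
def pvIsPk (c : Char) : Bool := c == '<' || c == '>'

-- the `for i, char in enumerate(structure)` loop, state (groups, in_group, start, group_content)
def pvEpgLoop (groups : List (Int × Int × String)) (in_group : Bool) (start : Int)
    (content : List Char) (i : Int) : List Char → List (Int × Int × String) × Bool × Int × List Char
  | [] => (groups, in_group, start, content)
  | c :: rest =>
    if pvIsPk c && !in_group then
      pvEpgLoop groups true i [c] (i + 1) rest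
    else if pvIsPk c && in_group then
      pvEpgLoop groups in_group start (content ++ [c]) (i + 1) rest
    else if !pvIsPk c && in_group then
      pvEpgLoop (if content.length > 0 then groups ++ [(start, i - 1, String.mk content)] else groups)
        false start [] (i + 1) rest
    else
      pvEpgLoop groups in_group start content (i + 1) rest

def extract_pseudoknot_groups (structure_ : String) : List (Int × Int × String) :=
  let cs := structure_.toList
  let st := pvEpgLoop [] false 0 [] 0 cs
  -- Añadir el último grupo si estamos dentro de uno
  if st.2.1 && st.2.2.2.length > 0 then
    st.1 ++ [(st.2.2.1, (cs.length : Int) - 1, String.mk st.2.2.2)]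
  else st.1

-- ===== PORT B =====
-- re.finditer over bracket runs: scan for maximal runs; each match m
-- contributes (m.start(), m.end()-1, m.group())
def pvEpgRuns (i : Int) : List Char → List (Int × Int × String)
  | [] => []
  | c :: rest =>
    if pvIsPk c then
      let run := c :: rest.takeWhile pvIsPk
      (i, i + (run.length : Int) - 1, String.mk run) :: pvEpgRuns (i + run.length) (rest.dropWhile pvIsPk)
    else
      pvEpgRuns (i + 1) rest
termination_by l => l.length
decreasing_by
  · simpa using Nat.lt_succ_of_le (List.length_dropWhile_le pvIsPk rest)
  · simp

def extract_pseudoknot_groups_alt (structure_ : String) : List (Int × Int × String) :=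
  pvEpgRuns 0 structure_.toList

-- ===== PRECONDITION & SPEC =====
def Spec_extract_pseudoknot_groups (structure_ : String) (out : List (Int × Int × String)) : Prop := out = extract_pseudoknot_groups_alt structure_
instance (structure_ : String) (out : List (Int × Int × String)) : Decidable (Spec_extract_pseudoknot_groups structure_ out) := by unfold Spec_extract_pseudoknot_groups; infer_instance

-- ===== CLAIM (what is proved, stated in full; the proofs are below) =====
def Claim_equal_extract_pseudoknot_groups : Prop := ∀ (structure_ : String), Dom_extract_pseudoknot_groups structure_ → Spec_extract_pseudoknot_groups structure_ (extract_pseudoknot_groups structure_)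

-- ===== LEMMAS AND PROOFS =====

-- finalization A applies after the loop, with n = total length
def pvFinish (st : List (Int × Int × String) × Bool × Int × List Char) (n : Int) : List (Int × Int × String) :=
  if st.2.1 && st.2.2.2.length > 0 then
    st.1 ++ [(st.2.2.1, n - 1, String.mk st.2.2.2)]
  else st.1

-- The core invariant, both loop phases at once.
theorem pvEpgLoop_runs (l : List Char) :
    (∀ (i start : Int) groups,
      pvFinish (pvEpgLoop groups false start [] i l) (i + l.length) = groups ++ pvEpgRuns i l) ∧
    (∀ (i start : Int) groups (run : List Char), run ≠ [] →
      pvFinish (pvEpgLoop groups true start run i l) (i + l.length) =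
        groups ++ (start, i + (l.takeWhile pvIsPk).length - 1,
            String.mk (run ++ l.takeWhile pvIsPk)) ::
          pvEpgRuns (i + (l.takeWhile pvIsPk).length) (l.dropWhile pvIsPk)) := by
  induction l with
  | nil =>
    constructor
    · intro i start groups
      simp [pvEpgLoop, pvEpgRuns, pvFinish]
    · intro i start groups run hrun
      simp [pvEpgLoop, pvEpgRuns, pvFinish, List.length_pos_iff, hrun]
  | cons c rest ih =>
    obtain ⟨ih₀, ih₁⟩ := ih
    constructor
    · intro i start groups
      rw [show i + (((c :: rest).length : Nat) : Int) = (i + 1) + (rest.length : Int) by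
        push_cast [List.length_cons]; ring]
      by_cases hc : pvIsPk c = true
      · rw [show pvEpgLoop groups false start [] i (c :: rest)
              = pvEpgLoop groups true i [c] (i + 1) rest by simp [pvEpgLoop, hc]]
        rw [ih₁ (i + 1) i groups [c] (by simp)]
        rw [show (i + 1) + (((rest.takeWhile pvIsPk).length : Nat) : Int)
              = i + ((((c :: rest).takeWhile pvIsPk).length : Nat) : Int) by
          simp [List.takeWhile_cons_of_pos hc]; ring]
        simp [pvEpgRuns, hc, List.takeWhile_cons_of_pos hc]
      · rw [show pvEpgLoop groups false start [] i (c :: rest)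
              = pvEpgLoop groups false start [] (i + 1) rest by simp [pvEpgLoop, hc]]
        rw [ih₀ (i + 1) start groups]
        simp [pvEpgRuns, hc]
    · intro i start groups run hrun
      rw [show i + (((c :: rest).length : Nat) : Int) = (i + 1) + (rest.length : Int) by
        push_cast [List.length_cons]; ring]
      by_cases hc : pvIsPk c = true
      · rw [show pvEpgLoop groups true start run i (c :: rest)
              = pvEpgLoop groups true start (run ++ [c]) (i + 1) rest by simp [pvEpgLoop, hc]]
        rw [ih₁ (i + 1) start groups (run ++ [c]) (by simp)]
        rw [show (i + 1) + (((rest.takeWhile pvIsPk).length : Nat) : Int)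
              = i + ((((c :: rest).takeWhile pvIsPk).length : Nat) : Int) by
          simp [List.takeWhile_cons_of_pos hc]; ring]
        simp [List.takeWhile_cons_of_pos hc, List.dropWhile_cons_of_pos hc]
      · rw [show pvEpgLoop groups true start run i (c :: rest)
              = pvEpgLoop (groups ++ [(start, i - 1, String.mk run)]) false start [] (i + 1) rest by
            simp [pvEpgLoop, hc, List.length_pos_iff, hrun]]
        rw [ih₀ (i + 1) start (groups ++ [(start, i - 1, String.mk run)])]
        simp [pvEpgRuns, hc]

-- ===== VERDICT (by name: the statement is the Claim_ definition above) =====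
theorem extract_pseudoknot_groups_spec : Claim_equal_extract_pseudoknot_groups := by
  intro s _
  show _ = _
  unfold extract_pseudoknot_groups extract_pseudoknot_groups_alt
  have h := (pvEpgLoop_runs s.toList).1 0 0 []
  simpa [pvFinish] using h
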